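-- pv_equiv track=rewrite | github.com/djkurlander/knock-knock | constants.py | sort_protocols_for_ui
-- ===== SOURCE A (Python) =====
-- PROTO = {'SSH': 0, 'TNET': 1, 'SMTP': 2, 'RDP': 3, 'MAIL': 4, 'FTP': 5, 'SIP': 6, 'SMB': 7}
--
-- PROTOCOL_UI_ORDER = ['SSH', 'TNET', 'FTP', 'RDP', 'SMB', 'SIP', 'MAIL', 'SMTP']
--
-- def sort_protocols_for_ui(protocols):
--     normalized = [str(p or '').upper() for p in (protocols or [])]
--     unique = []
--     for name in normalized:
--         if name in PROTO and name not in unique: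
--             unique.append(name)
--     preferred = [name for name in PROTOCOL_UI_ORDER if name in unique]
--     extras = sorted([name for name in unique if name not in preferred])
--     return preferred + extras
-- ===== SOURCE B (Python) =====
-- PROTO = {'SSH': 0, 'TNET': 1, 'SMTP': 2, 'RDP': 3, 'MAIL': 4, 'FTP': 5, 'SIP': 6, 'SMB': 7}
--
-- PROTOCOL_UI_ORDER = ['SSH', 'TNET', 'FTP', 'RDP', 'SMB', 'SIP', 'MAIL', 'SMTP']
--
-- def sort_protocols_for_ui(protocols):
--     # output order comes solely from PROTOCOL_UI_ORDER (PROTO and the order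
--     # list have the same key set, so A's "extras" branch is always empty)
--     present = {str(p or '').upper() for p in (protocols or [])}
--     return [name for name in PROTOCOL_UI_ORDER if name in present]
-- ===== Notes on version B (the rewrite author's own statement) =====
-- stated objective: simpler
-- what changed: B drops A's order-preserving unique loop and the preferred/extras split (the extras branch is dead since PROTO and PROTOCOL_UI_ORDER share the same key set): it builds one set of normalized names and filters the fixed UI order list by membership.
import Mathlib
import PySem

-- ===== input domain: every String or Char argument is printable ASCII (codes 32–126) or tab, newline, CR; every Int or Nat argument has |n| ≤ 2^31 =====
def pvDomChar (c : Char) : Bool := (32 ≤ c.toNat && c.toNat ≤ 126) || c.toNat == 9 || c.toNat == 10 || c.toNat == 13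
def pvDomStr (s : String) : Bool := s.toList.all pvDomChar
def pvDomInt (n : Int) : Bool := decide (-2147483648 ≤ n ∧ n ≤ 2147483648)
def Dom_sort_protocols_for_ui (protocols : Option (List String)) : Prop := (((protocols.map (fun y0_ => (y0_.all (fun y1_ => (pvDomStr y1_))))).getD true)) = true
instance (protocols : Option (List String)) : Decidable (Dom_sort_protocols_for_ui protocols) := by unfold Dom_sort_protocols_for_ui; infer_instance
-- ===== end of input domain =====

-- B drops A's order-preserving unique loop and the preferred/extras split (the extras
-- branch is dead: PROTO and PROTOCOL_UI_ORDER share the same key set); B filters the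
-- fixed UI order list by membership in the set of normalized names. Objective: simpler.

-- ===== PORT A =====
def PROTO : PySem.Dict String Int :=
  PySem.Dict.ofList [("SSH", 0), ("TNET", 1), ("SMTP", 2), ("RDP", 3), ("MAIL", 4), ("FTP", 5), ("SIP", 6), ("SMB", 7)]

def PROTOCOL_UI_ORDER : List String := ["SSH", "TNET", "FTP", "RDP", "SMB", "SIP", "MAIL", "SMTP"]

def sort_protocols_for_ui (protocols : Option (List String)) : List String :=
  let normalized := (protocols.getD []).map (fun p => PySem.Str.upper (if p = "" then "" else p))
  let unique := normalized.foldl (fun u name =>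
      if PROTO.contains name ∧ name ∉ u then u ++ [name] else u) []
  let preferred := PROTOCOL_UI_ORDER.filter (fun name => decide (name ∈ unique))
  let extras := PySem.List.sorted (unique.filter (fun name => decide (name ∉ preferred))) (fun x => x) false
  preferred ++ extras

-- ===== PORT B =====
def sort_protocols_for_ui_alt (protocols : Option (List String)) : List String :=
  let present : PySem.Set String :=
    PySem.Set.ofList ((protocols.getD []).map (fun p => PySem.Str.upper (if p = "" then "" else p)))
  PROTOCOL_UI_ORDER.filter (fun name => decide (name ∈ present))

-- ===== PRECONDITION & SPEC =====
def Spec_sort_protocols_for_ui (protocols : Option (List String)) (out : List String) : Prop := out = sort_protocols_for_ui_alt protocols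
instance (protocols : Option (List String)) (out : List String) : Decidable (Spec_sort_protocols_for_ui protocols out) := by unfold Spec_sort_protocols_for_ui; infer_instance

-- ===== CLAIM (what is proved, stated in full; the proofs are below) =====
def Claim_equal_sort_protocols_for_ui : Prop := ∀ (protocols : Option (List String)), Dom_sort_protocols_for_ui protocols → Spec_sort_protocols_for_ui protocols (sort_protocols_for_ui protocols)

-- ===== LEMMAS AND PROOFS =====

-- PROTO's key set is exactly PROTOCOL_UI_ORDER (as a membership test)
theorem contains_PROTO_iff (x : String) : PROTO.contains x = true ↔ x ∈ PROTOCOL_UI_ORDER := by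
  have h : PROTO = PySem.Dict.mk [("SSH", (0:Int)), ("TNET", 1), ("SMTP", 2), ("RDP", 3), ("MAIL", 4), ("FTP", 5), ("SIP", 6), ("SMB", 7)] := by decide
  rw [h]
  simp [PROTOCOL_UI_ORDER, PySem.Dict.contains_mk]
  constructor
  · rintro (h | h | h | h | h | h | h | h) <;> simp [h]
  · rintro (h | h | h | h | h | h | h | h) <;> simp [h]

-- membership in A's order-preserving unique loop
theorem mem_uniq_loop (ns acc : List String) (x : String) :
    x ∈ ns.foldl (fun u name => if PROTO.contains name ∧ name ∉ u then u ++ [name] else u) acc ↔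
      x ∈ acc ∨ (x ∈ ns ∧ PROTO.contains x = true) := by
  induction ns generalizing acc with
  | nil => simp
  | cons n ns ih =>
    simp only [List.foldl_cons, ih, List.mem_cons]
    by_cases hc : PROTO.contains n = true ∧ n ∉ acc
    · rw [if_pos hc]
      simp only [List.mem_append, List.mem_singleton]
      constructor
      · rintro (h | h)
        · rcases h with h | rfl
          · exact Or.inl h
          · exact Or.inr ⟨Or.inl rfl, hc.1⟩
        · exact Or.inr ⟨Or.inr h.1, h.2⟩
      · rintro (h | ⟨h | h, hx⟩)
        · exact Or.inl (Or.inl h)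
        · subst h; exact Or.inl (Or.inr rfl)
        · exact Or.inr ⟨h, hx⟩
    · rw [if_neg hc]
      constructor
      · rintro (h | h)
        · exact Or.inl h
        · exact Or.inr ⟨Or.inr h.1, h.2⟩
      · rintro (h | ⟨h | h, hx⟩)
        · exact Or.inl h
        · subst h
          by_cases ha : x ∈ acc
          · exact Or.inl ha
          · exact absurd ⟨hx, ha⟩ hc
        · exact Or.inr ⟨h, hx⟩

-- ===== VERDICT (by name: the statement is the Claim_ definition above) =====
theorem sort_protocols_for_ui_spec : Claim_equal_sort_protocols_for_ui := by
  intro protocols _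
  unfold Spec_sort_protocols_for_ui sort_protocols_for_ui sort_protocols_for_ui_alt
  set N := (protocols.getD []).map (fun p => PySem.Str.upper (if p = "" then "" else p)) with hN
  simp only []
  set unique := N.foldl (fun u name => if PROTO.contains name ∧ name ∉ u then u ++ [name] else u) [] with hu
  have huniq : ∀ x, x ∈ unique ↔ x ∈ N ∧ PROTO.contains x = true := by
    intro x; rw [hu, mem_uniq_loop]; simp
  set preferred := PROTOCOL_UI_ORDER.filter (fun name => decide (name ∈ unique)) with hp
  have hextras : unique.filter (fun name => decide (name ∉ preferred)) = [] := by
    rw [List.filter_eq_nil_iff]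
    intro a ha
    simp only [decide_eq_true_eq, not_not]
    have h1 := (huniq a).1 ha
    rw [hp, List.mem_filter]
    exact ⟨(contains_PROTO_iff a).1 h1.2, by simp [ha]⟩
  rw [hextras]
  have : PySem.List.sorted ([] : List String) (fun x => x) false = [] := rfl
  rw [this, List.append_nil, hp]
  apply List.filter_congr
  intro a ha
  simp only [huniq a, PySem.Set.mem_ofList]
  simp [(contains_PROTO_iff a).2 ha]
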